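-- pv_equiv track=rewrite | github.com/jiahengxiong/DRL-CCL | DRL-tree/main_bfs_sim.py | rebuild_children_and_depth
-- ===== SOURCE A (Python) =====
-- def rebuild_children_and_depth(children, root):
--     from collections import defaultdict, deque
--     depth = {root: 0}
--     clean = defaultdict(list)
--     q = deque([root])
--     while q:
--         u = q.popleft()
--         for v in children.get(u, []):
--             if v in depth:
--                 continue
--             depth[v] = depth[u] + 1
--             clean[u].append(v)
--             q.append(v)
--     max_d = max(depth.values()) if depth else 0
--     return clean, depth, max_d
-- ===== SOURCE B (Python) =====
-- def rebuild_children_and_depth(children, root):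
--     from collections import defaultdict
--     # Level-synchronous BFS: no queue, no per-node depth lookups, no max() scan.
--     visited = {root}
--     clean = defaultdict(list)
--     levels = []
--     frontier = [root]
--     while frontier:
--         levels.append(frontier)
--         nxt = []
--         for u in frontier:
--             for v in children.get(u, []):
--                 if v not in visited:
--                     visited.add(v)
--                     clean[u].append(v)
--                     nxt.append(v)
--         frontier = nxt
--     depth = {v: d for d, level in enumerate(levels) for v in level}
--     max_d = len(levels) - 1
--     return clean, depth, max_d
-- ===== Notes on version B (the rewrite author's own statement) =====
-- stated objective: alternative
-- what changed: B replaces A's deque-driven BFS (per-node pops, depth[u]+1 lookups, final max() scan over depth.values()) by a level-synchronous BFS: it keeps whole frontier lists, collects the levels, derives the depth dict afterwards from enumerate(levels), and gets max_d as len(levels)-1 with no max() pass.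
import Mathlib
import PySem

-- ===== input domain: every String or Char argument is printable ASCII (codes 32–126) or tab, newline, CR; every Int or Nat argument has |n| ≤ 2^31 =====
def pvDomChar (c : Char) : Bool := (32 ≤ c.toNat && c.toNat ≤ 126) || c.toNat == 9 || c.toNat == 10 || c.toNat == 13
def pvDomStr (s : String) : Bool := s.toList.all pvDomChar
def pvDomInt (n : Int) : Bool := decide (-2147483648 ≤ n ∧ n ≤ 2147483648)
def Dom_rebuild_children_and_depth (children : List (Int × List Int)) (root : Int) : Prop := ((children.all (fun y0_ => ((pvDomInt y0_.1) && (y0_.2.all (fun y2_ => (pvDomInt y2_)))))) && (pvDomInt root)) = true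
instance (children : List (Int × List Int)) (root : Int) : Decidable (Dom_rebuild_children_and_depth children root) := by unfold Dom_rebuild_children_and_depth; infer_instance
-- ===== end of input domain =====

-- B replaces A's deque BFS (per-node pops, depth[u]+1 lookups, final max() over depth.values())
-- by a level-synchronous BFS: frontier lists are processed whole, the levels are collected, the
-- depth dict is derived afterwards from enumerate(levels) and max_d is len(levels)-1; objective: alternative.


-- children.get(u, []) on the dict argument: first-match association-list lookup
def pvChildGet (children : List (Int × List Int)) (u : Int) : List Int :=
  (((children.find? (fun p => p.1 == u)).map (·.2)).getD [])

-- fuel: 1 + total number of child entries, an upper bound on the number of BFS pops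
-- (each enqueue after the root consumes one fresh child entry), so neither loop runs dry
def pvFuel (children : List (Int × List Int)) : Nat :=
  1 + children.foldl (fun a p => a + p.2.length) 0

-- ===== PORT A =====
-- body of A's `for v in children.get(u, [])`: state (depth, clean, queue)
def pvStepA (u : Int) (s : PySem.Dict Int Int × PySem.Dict Int (List Int) × List Int) (v : Int) :
    PySem.Dict Int Int × PySem.Dict Int (List Int) × List Int :=
  if s.1.contains v then s
  else (s.1.insert v (s.1.getD u 0 + 1), s.2.1.modify u [] (fun l => l ++ [v]), s.2.2 ++ [v])

-- A's `while q` loop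
def pvLoopA (children : List (Int × List Int)) :
    Nat → PySem.Dict Int Int → PySem.Dict Int (List Int) → List Int →
    PySem.Dict Int Int × PySem.Dict Int (List Int)
  | _, d, c, [] => (d, c)
  | 0, d, c, _ => (d, c)
  | f + 1, d, c, u :: qs =>
      let s := (pvChildGet children u).foldl (pvStepA u) (d, c, qs)
      pvLoopA children f s.1 s.2.1 s.2.2

def rebuild_children_and_depth (children : List (Int × List Int)) (root : Int) :
    (List (Int × List Int)) × (List (Int × Int)) × Int :=
  let s := pvLoopA children (pvFuel children) ((PySem.Dict.empty).insert root 0) PySem.Dict.empty [root]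
  (s.2.items, s.1.items,
    if s.1.items = [] then 0 else (PySem.List.max? s.1.values (fun x => x)).getD 0)

-- ===== PORT B =====
-- body of B's inner `if v not in visited`: state (visited, clean, nxt)
def pvStepC (u : Int) (s : PySem.Set Int × PySem.Dict Int (List Int) × List Int) (v : Int) :
    PySem.Set Int × PySem.Dict Int (List Int) × List Int :=
  if PySem.Set.contains s.1 v then s
  else (PySem.Set.add s.1 v, s.2.1.modify u [] (fun l => l ++ [v]), s.2.2 ++ [v])

-- B's `for u in frontier` pass over one whole level
def pvLvl (children : List (Int × List Int))
    (st : PySem.Set Int × PySem.Dict Int (List Int) × List Int) (fr : List Int) :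
    PySem.Set Int × PySem.Dict Int (List Int) × List Int :=
  fr.foldl (fun s u => (pvChildGet children u).foldl (pvStepC u) s) st

-- B's `while frontier` loop over levels
def pvLoopC (children : List (Int × List Int)) :
    Nat → PySem.Set Int → PySem.Dict Int (List Int) → List (List Int) → List Int →
    PySem.Set Int × PySem.Dict Int (List Int) × List (List Int)
  | _, vis, c, ls, [] => (vis, c, ls)
  | 0, vis, c, ls, _ => (vis, c, ls)
  | f + 1, vis, c, ls, fr =>
      let s := pvLvl children (vis, c, []) fr
      pvLoopC children f s.1 s.2.1 (ls ++ [fr]) s.2.2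

-- B's `{v: d for d, level in enumerate(levels) for v in level}`
def pvDepthAux : List (List Int) → PySem.Dict Int Int → Int → PySem.Dict Int Int
  | [], d, _ => d
  | lvl :: t, d, i => pvDepthAux t (lvl.foldl (fun d v => d.insert v i) d) (i + 1)

def rebuild_children_and_depth_alt (children : List (Int × List Int)) (root : Int) :
    (List (Int × List Int)) × (List (Int × Int)) × Int :=
  let s := pvLoopC children (pvFuel children) (PySem.Set.ofList [root]) PySem.Dict.empty [] [root]
  (s.2.1.items, (pvDepthAux s.2.2 PySem.Dict.empty 0).items, (s.2.2.length : Int) - 1)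

-- ===== PRECONDITION & SPEC =====
def Spec_rebuild_children_and_depth (children : List (Int × List Int)) (root : Int) (out : (List (Int × List Int)) × (List (Int × Int)) × Int) : Prop := out = rebuild_children_and_depth_alt children root
instance (children : List (Int × List Int)) (root : Int) (out : (List (Int × List Int)) × (List (Int × Int)) × Int) : Decidable (Spec_rebuild_children_and_depth children root out) := by unfold Spec_rebuild_children_and_depth; infer_instance

-- ===== CLAIM =====
def Claim_equal_rebuild_children_and_depth : Prop := ∀ (children : List (Int × List Int)) (root : Int), Dom_rebuild_children_and_depth children root → Spec_rebuild_children_and_depth children root (rebuild_children_and_depth children root)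

-- ===== LEMMAS AND PROOFS =====

-- proof-only: insert the nodes of one level, all at the same depth
def insAll (d : PySem.Dict Int Int) (xs : List Int) (k : Int) : PySem.Dict Int Int :=
  xs.foldl (fun d v => d.insert v k) d

-- proof-only: total length of the child lists of entries whose key has not been popped yet
def pvCap (children : List (Int × List Int)) (popped : List Int) : Nat :=
  match children with
  | [] => 0
  | p :: rest => (if popped.contains p.1 then 0 else p.2.length) + pvCap rest popped

theorem insAll_append (d : PySem.Dict Int Int) (xs ys : List Int) (k : Int) :
    insAll d (xs ++ ys) k = insAll (insAll d xs k) ys k := by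
  simp [insAll, List.foldl_append]

theorem insAll_contains_mono (xs : List Int) (k : Int) :
    ∀ (d : PySem.Dict Int Int) (w : Int), d.contains w = true → (insAll d xs k).contains w = true := by
  induction xs with
  | nil => intro d w h; exact h
  | cons v t ih =>
      intro d w h
      exact ih _ w (by rw [PySem.Dict.contains_insert]; simp [h])

theorem pvCap_subset (popped : List Int) (u : Int) :
    ∀ children : List (Int × List Int),
      pvCap children (popped ++ [u]) ≤ pvCap children popped := by
  intro children
  induction children with
  | nil => simp [pvCap]
  | cons p rest ih =>
      simp only [pvCap]
      by_cases hpop : popped.contains p.1 = true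
      · have : (popped ++ [u]).contains p.1 = true := by simp_all [List.contains_append]
        simp only [this, hpop, if_true]
        omega
      · simp only [hpop, if_neg, Bool.not_eq_true]
        by_cases hnew : (popped ++ [u]).contains p.1 = true
        · simp only [hnew, if_true]
          omega
        · simp only [if_neg hnew, if_neg hpop]
          omega

theorem pvCap_pop (popped : List Int) (u : Int) (hu : popped.contains u = false) :
    ∀ children : List (Int × List Int),
      pvCap children (popped ++ [u]) + (pvChildGet children u).length ≤ pvCap children popped := by
  intro children
  induction children with
  | nil => simp [pvCap, pvChildGet]
  | cons p rest ih =>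
      by_cases hpu : p.1 = u
      · have hpop : popped.contains p.1 = false := by rw [hpu]; exact hu
        have hnew : (popped ++ [u]).contains p.1 = true := by
          simp [List.contains_append, List.contains_cons, hpu]
        have hcg : pvChildGet (p :: rest) u = p.2 := by
          simp [pvChildGet, List.find?, hpu]
        simp only [pvCap, hnew, if_true, hpop, Bool.false_eq_true, if_false, hcg]
        have h2 := pvCap_subset popped u rest
        omega
      · have hcontains : (popped ++ [u]).contains p.1 = popped.contains p.1 := by
          simp [List.contains_append, List.contains_cons, hpu]
        have hcg : pvChildGet (p :: rest) u = pvChildGet rest u := by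
          have : (p.1 == u) = false := by simp [hpu]
          simp [pvChildGet, List.find?, this]
        simp only [pvCap, hcontains, hcg]
        omega

theorem pvFuel_aux (l : List (Int × List Int)) :
    ∀ a : Nat, l.foldl (fun a p => a + p.2.length) a = a + pvCap l [] := by
  induction l with
  | nil => intro a; simp [pvCap]
  | cons p rest ih =>
      intro a
      simp only [List.foldl_cons, pvCap, ih]
      have hc : ([] : List Int).contains p.1 = false := rfl
      rw [hc]
      simp
      omega

theorem pvFuel_eq (children : List (Int × List Int)) :
    pvFuel children = 1 + pvCap children [] := by
  simp [pvFuel, pvFuel_aux]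

theorem pvDepthAux_append (ls : List (List Int)) :
    ∀ (d : PySem.Dict Int Int) (i : Int) (lvl : List Int),
      pvDepthAux (ls ++ [lvl]) d i = insAll (pvDepthAux ls d i) lvl (i + ls.length) := by
  induction ls with
  | nil => intro d i lvl; simp [pvDepthAux, insAll]
  | cons l t ih =>
      intro d i lvl
      simp only [List.cons_append, pvDepthAux, ih]
      have : i + 1 + (t.length : Int) = i + ((l :: t).length : Int) := by
        simp; ring
      rw [this]

theorem max?_append_const (xs ys : List Int) (m w : Int)
    (h : PySem.List.max? xs (fun x => x) = some m) (hys : ys ≠ [])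
    (hw : ∀ y ∈ ys, y = w) (hmw : m < w) :
    PySem.List.max? (xs ++ ys) (fun x => x) = some w := by
  simp only [PySem.List.max?] at h ⊢
  rw [List.foldl_append, h]
  suffices H : ∀ (f : Option Int → Int → Option Int),
      (∀ (a x : Int), f (some a) x = if a < x then some x else some a) →
      ∀ (t : List Int) (a : Int), (∀ y ∈ t, y = w) →
      ((a = w → t.foldl f (some a) = some w) ∧ (a < w → t ≠ [] → t.foldl f (some a) = some w)) by
    refine (H _ (fun a x => ?_) ys m hw).2 hmw hys
    by_cases hx : a < x <;> simp [hx]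
  intro f hf t
  induction t with
  | nil =>
      intro a _
      exact ⟨fun ha => by simp [ha], fun _ hne => absurd rfl hne⟩
  | cons y t ih =>
      intro a hall
      have hy : y = w := hall y (by simp)
      have hrest : ∀ z ∈ t, z = w := fun z hz => hall z (by simp [hz])
      constructor
      · intro ha
        subst ha
        rw [List.foldl_cons, hf]
        rw [hy, if_neg (lt_irrefl a)]
        exact (ih a hrest).1 rfl
      · intro ha _
        rw [List.foldl_cons, hf, hy, if_pos ha]
        exact (ih w hrest).1 rfl

-- per-node simulation: one scan of u's child list, A's step vs B's step
theorem pv_node (children : List (Int × List Int)) (u : Int) (k : Int) :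
    ∀ (cs : List Int) (d : PySem.Dict Int Int) (c : PySem.Dict Int (List Int))
      (nxt rest : List Int),
    d.contains u = true → d.getD u 0 = k →
    (∀ v ∈ nxt, d.contains v = true ∧ d.getD v 0 = k + 1) →
    ∃ new : List Int,
      (cs.foldl (pvStepC u) (d.keys, c, nxt)).2.2 = nxt ++ new ∧
      cs.foldl (pvStepA u) (d, c, rest ++ nxt)
        = (insAll d new (k+1), (cs.foldl (pvStepC u) (d.keys, c, nxt)).2.1, rest ++ (nxt ++ new)) ∧
      (cs.foldl (pvStepC u) (d.keys, c, nxt)).1 = (insAll d new (k+1)).keys ∧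
      (insAll d new (k+1)).values = d.values ++ new.map (fun _ => k + 1) ∧
      new.length ≤ cs.length ∧ new.Nodup ∧
      (∀ v ∈ new, d.contains v = false) ∧
      (∀ w, d.contains w = true → (insAll d new (k+1)).contains w = true ∧
            (insAll d new (k+1)).getD w 0 = d.getD w 0) ∧
      (∀ v ∈ nxt ++ new, (insAll d new (k+1)).contains v = true ∧
            (insAll d new (k+1)).getD v 0 = k + 1) := by
  intro cs
  induction cs with
  | nil =>
      intro d c nxt rest hu hku hnxt
      exact ⟨[], by simp [insAll], by simp [insAll], by simp [insAll], by simp [insAll],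
        by simp, by simp, by simp, fun w h => ⟨by simpa [insAll] using h, by simp [insAll]⟩,
        by simpa [insAll] using hnxt⟩
  | cons v cs' ih =>
      intro d c nxt rest hu hku hnxt
      by_cases hv : d.contains v = true
      · -- already discovered: both sides skip
        have hA : pvStepA u (d, c, rest ++ nxt) v = (d, c, rest ++ nxt) := by
          simp [pvStepA, hv]
        have hmem : v ∈ d.keys := by
          have := PySem.Dict.contains_eq_decide_mem_keys d v
          rw [hv] at this; exact of_decide_eq_true this.symm
        have hC : pvStepC u (d.keys, c, nxt) v = (d.keys, c, nxt) := by
          simp [pvStepC, PySem.Set.contains, hmem]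
        simp only [List.foldl_cons, hA, hC]
        obtain ⟨new, h1, h2, h3, h4, h5, h6, h7, h8, h9⟩ := ih d c nxt rest hu hku hnxt
        exact ⟨new, h1, h2, h3, h4, Nat.le_succ_of_le h5, h6, h7, h8, h9⟩
      · have hv' : d.contains v = false := by
          cases h : d.contains v with
          | false => rfl
          | true => exact absurd h hv
        have hA : pvStepA u (d, c, rest ++ nxt) v
            = (d.insert v (k+1), c.modify u [] (fun l => l ++ [v]), rest ++ (nxt ++ [v])) := by
          simp [pvStepA, hv', hku, List.append_assoc]
        have hkeys : (d.insert v (k+1)).keys = d.keys ++ [v] :=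
          PySem.Dict.keys_insert_of_not_contains d _ hv'
        have hmem : v ∉ d.keys := by
          have := PySem.Dict.contains_eq_decide_mem_keys d v
          rw [hv'] at this
          exact of_decide_eq_false this.symm
        have hC : pvStepC u (d.keys, c, nxt) v
            = ((d.insert v (k+1)).keys, c.modify u [] (fun l => l ++ [v]), nxt ++ [v]) := by
          simp [pvStepC, PySem.Set.contains, PySem.Set.add, hmem, hkeys]
        simp only [List.foldl_cons, hA, hC]
        have hu' : (d.insert v (k+1)).contains u = true := by
          rw [PySem.Dict.contains_insert]; simp [hu]
        have hvu : u ≠ v := fun h => by rw [h] at hu; rw [hu] at hv'; cases hv'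
        have hku' : (d.insert v (k+1)).getD u 0 = k := by
          rw [PySem.Dict.getD_insert, if_neg hvu]; exact hku
        have hnxt' : ∀ w ∈ nxt ++ [v], (d.insert v (k+1)).contains w = true ∧
            (d.insert v (k+1)).getD w 0 = k + 1 := by
          intro w hw
          rcases List.mem_append.mp hw with hw | hw
          · obtain ⟨hc, hg⟩ := hnxt w hw
            have hwv : w ≠ v := fun h => by rw [h] at hc; rw [hc] at hv'; cases hv'
            exact ⟨by rw [PySem.Dict.contains_insert]; simp [hc],
                   by rw [PySem.Dict.getD_insert, if_neg hwv]; exact hg⟩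
          · simp only [List.mem_singleton] at hw; subst hw
            exact ⟨by rw [PySem.Dict.contains_insert]; simp,
                   by rw [PySem.Dict.getD_insert, if_pos rfl]⟩
        obtain ⟨new', h1, h2, h3, h4, h5, h6, h7, h8, h9⟩ :=
          ih (d.insert v (k+1)) (c.modify u [] (fun l => l ++ [v])) (nxt ++ [v]) rest hu' hku' hnxt'
        have hins : insAll d (v :: new') (k+1) = insAll (d.insert v (k+1)) new' (k+1) := rfl
        have hvalsd : (d.insert v (k+1)).values = d.values ++ [k+1] := by
          have := PySem.Dict.items_insert_of_not_contains d (k+1) hv'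
          simp [PySem.Dict.values, this]
        refine ⟨v :: new', by rw [h1]; simp, ?_, ?_, ?_, by simpa using Nat.succ_le_succ h5, ?_, ?_, ?_, ?_⟩
        · rw [h2, hins]; simp
        · rw [h3, hins]
        · rw [hins, h4, hvalsd]; simp
        · -- Nodup (v :: new')
          refine List.nodup_cons.mpr ⟨?_, h6⟩
          intro hvmem
          have := h7 v hvmem
          rw [PySem.Dict.contains_insert] at this; simp at this
        · -- freshness wrt d
          intro w hw
          rcases List.mem_cons.mp hw with hw | hw
          · subst hw; exact hv'
          · have hfresh := h7 w hw
            cases h : d.contains w with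
            | false => rfl
            | true =>
                have : (d.insert v (k+1)).contains w = true := by
                  rw [PySem.Dict.contains_insert]; simp [h]
                rw [this] at hfresh; cases hfresh
        · -- preservation
          intro w hw
          have hwv : w ≠ v := fun h => by rw [h] at hw; rw [hw] at hv'; cases hv'
          have hw' : (d.insert v (k+1)).contains w = true := by
            rw [PySem.Dict.contains_insert]; simp [hw]
          obtain ⟨hc, hg⟩ := h8 w hw'
          rw [hins]
          exact ⟨hc, by rw [hg, PySem.Dict.getD_insert, if_neg hwv]⟩
        · -- all of nxt ++ (v :: new')
          intro w hw
          rw [hins]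
          apply h9
          rcases List.mem_append.mp hw with hw | hw
          · exact List.mem_append.mpr (Or.inl (List.mem_append.mpr (Or.inl hw)))
          · rcases List.mem_cons.mp hw with hw | hw
            · subst hw; exact List.mem_append.mpr (Or.inl (by simp))
            · exact List.mem_append.mpr (Or.inr hw)

-- per-level simulation: A pops the whole frontier one node at a time, B folds over it
theorem pv_level (children : List (Int × List Int)) (k : Int) :
    ∀ (fr : List Int) (d : PySem.Dict Int Int) (c : PySem.Dict Int (List Int))
      (nxt popped : List Int) (fA : Nat),
    (∀ u ∈ fr, d.contains u = true ∧ d.getD u 0 = k) →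
    (∀ v ∈ nxt, d.contains v = true ∧ d.getD v 0 = k + 1) →
    (popped ++ fr).Nodup →
    (∀ x ∈ popped, d.contains x = true) →
    fr.length + nxt.length + pvCap children popped ≤ fA →
    ∃ new : List Int,
      (pvLvl children (d.keys, c, nxt) fr).2.2 = nxt ++ new ∧
      pvLoopA children fA d c (fr ++ nxt)
        = pvLoopA children (fA - fr.length) (insAll d new (k+1))
            (pvLvl children (d.keys, c, nxt) fr).2.1 (nxt ++ new) ∧
      (pvLvl children (d.keys, c, nxt) fr).1 = (insAll d new (k+1)).keys ∧
      (insAll d new (k+1)).values = d.values ++ new.map (fun _ => k + 1) ∧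
      new.Nodup ∧
      (∀ v ∈ new, d.contains v = false) ∧
      (∀ x ∈ popped ++ fr, (insAll d new (k+1)).contains x = true) ∧
      (∀ v ∈ nxt ++ new, (insAll d new (k+1)).contains v = true ∧
          (insAll d new (k+1)).getD v 0 = k + 1) ∧
      (nxt ++ new).length + pvCap children (popped ++ fr) ≤ fA - fr.length := by
  intro fr
  induction fr with
  | nil =>
      intro d c nxt popped fA hfr hnxt hnodup hpop hfuel
      refine ⟨[], by simp [pvLvl], by simp [pvLvl, insAll], by simp [pvLvl, insAll],
        by simp [insAll], by simp, by simp, ?_, ?_, ?_⟩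
      · intro x hx; simp only [List.append_nil] at hx
        simpa [insAll] using hpop x hx
      · intro v hv; simp only [List.append_nil] at hv
        simpa [insAll] using hnxt v hv
      · simp only [List.length_nil, List.length_append, List.append_nil] at hfuel ⊢
        omega
  | cons u fr' ih =>
      intro d c nxt popped fA hfr hnxt hnodup hpop hfuel
      have hu : d.contains u = true ∧ d.getD u 0 = k := hfr u (by simp)
      obtain ⟨fA0, rfl⟩ : ∃ m, fA = m + 1 := ⟨fA - 1, by simp at hfuel; omega⟩
      obtain ⟨new1, n1, n2, n3, n4, n5, n6, n7, n8, n9⟩ :=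
        pv_node children u k (pvChildGet children u) d c nxt fr' hu.1 hu.2 hnxt
      have hnotin : u ∉ popped := by
        rw [List.nodup_append] at hnodup
        exact fun hmem => hnodup.2.2 u hmem u (by simp) rfl
      have hcontu : popped.contains u = false := by simpa using hnotin
      have hcap := pvCap_pop popped u hcontu children
      -- the B-side level state after node u
      have hC1 : pvLvl children (d.keys, c, nxt) (u :: fr')
          = pvLvl children ((insAll d new1 (k+1)).keys,
              ((pvChildGet children u).foldl (pvStepC u) (d.keys, c, nxt)).2.1,
              nxt ++ new1) fr' := by
        show pvLvl children ((pvChildGet children u).foldl (pvStepC u) (d.keys, c, nxt)) fr' = _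
        rw [show ((insAll d new1 (k+1)).keys,
              ((pvChildGet children u).foldl (pvStepC u) (d.keys, c, nxt)).2.1,
              nxt ++ new1)
            = (((pvChildGet children u).foldl (pvStepC u) (d.keys, c, nxt)).1,
              ((pvChildGet children u).foldl (pvStepC u) (d.keys, c, nxt)).2.1,
              ((pvChildGet children u).foldl (pvStepC u) (d.keys, c, nxt)).2.2) from by
          rw [n3, n1]]
      -- the A-side one step
      have hA1 : pvLoopA children (fA0 + 1) d c ((u :: fr') ++ nxt)
          = pvLoopA children fA0 (insAll d new1 (k+1))
              ((pvChildGet children u).foldl (pvStepC u) (d.keys, c, nxt)).2.1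
              (fr' ++ (nxt ++ new1)) := by
        show (let s := (pvChildGet children u).foldl (pvStepA u) (d, c, fr' ++ nxt)
              pvLoopA children fA0 s.1 s.2.1 s.2.2) = _
        rw [n2]
      obtain ⟨new2, m1, m2, m3, m4, m5, m6, m7, m8, m9⟩ :=
        ih (insAll d new1 (k+1))
          ((pvChildGet children u).foldl (pvStepC u) (d.keys, c, nxt)).2.1
          (nxt ++ new1) (popped ++ [u]) fA0
          (fun u' hu' => ⟨(n8 u' (hfr u' (by simp [hu'])).1).1,
            ((n8 u' (hfr u' (by simp [hu'])).1).2).trans (hfr u' (by simp [hu'])).2⟩)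
          n9
          (by simpa using hnodup)
          (by
            intro x hx
            rcases List.mem_append.mp hx with hx | hx
            · exact (n8 x (hpop x hx)).1
            · simp only [List.mem_singleton] at hx; subst hx
              exact (n8 x hu.1).1)
          (by
            simp only [List.length_cons, List.length_append] at hfuel ⊢
            omega)
      refine ⟨new1 ++ new2, ?_, ?_, ?_, ?_, ?_, ?_, ?_, ?_, ?_⟩
      · rw [hC1, m1]; simp
      · rw [hA1, m2, ← insAll_append, hC1]
        simp [Nat.succ_sub_succ]
      · rw [hC1, m3, insAll_append]
      · rw [insAll_append, m4, n4]; simp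
      · rw [List.nodup_append]
        refine ⟨n6, m5, ?_⟩
        intro a ha b hb hab
        have hda : (insAll d new1 (k+1)).contains a = true :=
          (n9 a (List.mem_append.mpr (Or.inr ha))).1
        have hdb : (insAll d new1 (k+1)).contains b = false := m6 b hb
        rw [hab] at hda; rw [hda] at hdb; cases hdb
      · intro v hv
        rcases List.mem_append.mp hv with hv | hv
        · exact n7 v hv
        · cases h : d.contains v with
          | false => rfl
          | true =>
              have := insAll_contains_mono new1 (k+1) d v h
              rw [m6 v hv] at this; cases this
      · intro x hx
        rw [insAll_append]
        apply m7
        rcases List.mem_append.mp hx with hx | hx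
        · exact List.mem_append.mpr (Or.inl (List.mem_append.mpr (Or.inl hx)))
        · rcases List.mem_cons.mp hx with hx | hx
          · subst hx; exact List.mem_append.mpr (Or.inl (by simp))
          · exact List.mem_append.mpr (Or.inr hx)
      · intro v hv
        rw [insAll_append]
        apply m8
        rcases List.mem_append.mp hv with hv | hv
        · exact List.mem_append.mpr (Or.inl (List.mem_append.mpr (Or.inl hv)))
        · rcases List.mem_append.mp hv with hv | hv
          · exact List.mem_append.mpr (Or.inl (List.mem_append.mpr (Or.inr hv)))
          · exact List.mem_append.mpr (Or.inr hv)
      · have hl : ((popped ++ [u]) ++ fr') = popped ++ u :: fr' := by simp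
        rw [hl] at m9
        simp only [List.length_append, List.length_cons] at m9 ⊢
        omega

-- whole-BFS simulation at level boundaries
theorem pv_main (children : List (Int × List Int)) :
    ∀ (fC fA : Nat) (d : PySem.Dict Int Int) (c : PySem.Dict Int (List Int))
      (ls : List (List Int)) (fr popped : List Int),
    (∀ u ∈ fr, d.contains u = true ∧ d.getD u 0 = (ls.length : Int)) →
    d = pvDepthAux (ls ++ [fr]) PySem.Dict.empty 0 →
    PySem.List.max? d.values (fun x => x) = some ((ls.length : Int)) →
    fr ≠ [] →
    (popped ++ fr).Nodup →
    (∀ x ∈ popped, d.contains x = true) →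
    fr.length + pvCap children popped ≤ fA →
    fA ≤ fC →
    (pvLoopA children fA d c fr).2 = (pvLoopC children fC d.keys c ls fr).2.1 ∧
    (pvLoopA children fA d c fr).1
      = pvDepthAux (pvLoopC children fC d.keys c ls fr).2.2 PySem.Dict.empty 0 ∧
    PySem.List.max? (pvLoopA children fA d c fr).1.values (fun x => x)
      = some (((pvLoopC children fC d.keys c ls fr).2.2.length : Int) - 1) := by
  intro fC
  induction fC with
  | zero =>
      intro fA d c ls fr popped _ _ _ hfr _ _ hfuel hfC
      exfalso
      have : 1 ≤ fr.length := by
        cases fr with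
        | nil => exact absurd rfl hfr
        | cons a b => simp
      omega
  | succ fC' ih =>
      intro fA d c ls fr popped hfr hdep hmax hfrne hnodup hpop hfuel hfC
      cases fr with
      | nil => exact absurd rfl hfrne
      | cons u fr0 =>
      obtain ⟨new, l1, l2, l3, l4, l5, l6, l7, l8, l9⟩ :=
        pv_level children (ls.length : Int) (u :: fr0) d c [] popped fA hfr
          (by simp) (by simpa using hnodup) hpop (by simpa using hfuel)
      simp only [List.nil_append] at l1 l2 l8 l9
      rw [List.append_nil] at l2
      have hCstep : pvLoopC children (fC' + 1) d.keys c ls (u :: fr0)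
          = pvLoopC children fC'
              (pvLvl children (d.keys, c, []) (u :: fr0)).1
              (pvLvl children (d.keys, c, []) (u :: fr0)).2.1
              (ls ++ [u :: fr0])
              (pvLvl children (d.keys, c, []) (u :: fr0)).2.2 := rfl
      by_cases hnew : new = []
      · subst hnew
        simp only [insAll] at l2
        simp only [List.foldl_nil] at l2
        rw [hCstep, l1]
        have hAend : pvLoopA children fA d c (u :: fr0)
            = (d, (pvLvl children (d.keys, c, []) (u :: fr0)).2.1) := by
          rw [l2]
          cases fA - (u :: fr0).length <;> rfl
        have hCend : pvLoopC children fC'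
            (pvLvl children (d.keys, c, []) (u :: fr0)).1
            (pvLvl children (d.keys, c, []) (u :: fr0)).2.1 (ls ++ [u :: fr0]) []
            = ((pvLvl children (d.keys, c, []) (u :: fr0)).1,
               (pvLvl children (d.keys, c, []) (u :: fr0)).2.1, ls ++ [u :: fr0]) := by
          cases fC' <;> rfl
        rw [hAend, hCend]
        refine ⟨rfl, hdep, ?_⟩
        rw [hmax]
        congr 1
        simp
      · -- recursive case: new is the next nonempty frontier
        have hk1 : (ls.length : Int) + 1 = (((ls ++ [u :: fr0]).length : Nat) : Int) := by
          simp
        have hfr' : ∀ v ∈ new, (insAll d new ((ls.length : Int)+1)).contains v = true ∧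
            (insAll d new ((ls.length : Int)+1)).getD v 0 = (((ls ++ [u :: fr0]).length : Nat) : Int) := by
          intro v hv
          obtain ⟨h1, h2⟩ := l8 v hv
          exact ⟨h1, by rw [h2, hk1]⟩
        have hdep' : insAll d new ((ls.length : Int)+1)
            = pvDepthAux ((ls ++ [u :: fr0]) ++ [new]) PySem.Dict.empty 0 := by
          rw [pvDepthAux_append, ← hdep]
          congr 1
          simp
        have hmaxapp := max?_append_const d.values (new.map (fun _ => (ls.length : Int) + 1))
            (ls.length : Int) ((ls.length : Int) + 1) hmax
            (by simpa using hnew)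
            (by intro y hy; simp at hy; obtain ⟨a, _, rfl⟩ := hy; rfl)
            (by omega)
        have hmax' : PySem.List.max? (insAll d new ((ls.length : Int)+1)).values (fun x => x)
            = some ((((ls ++ [u :: fr0]).length : Nat) : Int)) := by
          rw [l4, hmaxapp]
          exact congrArg some hk1
        have hnodup' : ((popped ++ (u :: fr0)) ++ new).Nodup := by
          rw [List.nodup_append]
          refine ⟨hnodup, l5, ?_⟩
          intro a ha b hb hab
          have hda : d.contains a = true := by
            rcases List.mem_append.mp ha with ha | ha
            · exact hpop a ha
            · exact (hfr a ha).1
          have hdb : d.contains b = false := l6 b hb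
          rw [hab] at hda; rw [hda] at hdb; cases hdb
        have hpop' : ∀ x ∈ popped ++ (u :: fr0),
            (insAll d new ((ls.length : Int)+1)).contains x = true := l7
        have hfuel' : new.length + pvCap children (popped ++ (u :: fr0)) ≤ fA - (u :: fr0).length := l9
        have hfC' : fA - (u :: fr0).length ≤ fC' := by
          have : 1 ≤ (u :: fr0).length := by simp
          omega
        obtain ⟨e1, e2, e3⟩ := ih (fA - (u :: fr0).length)
          (insAll d new ((ls.length : Int)+1))
          (pvLvl children (d.keys, c, []) (u :: fr0)).2.1
          (ls ++ [u :: fr0]) new (popped ++ (u :: fr0))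
          hfr' hdep' hmax' hnew hnodup' hpop' hfuel' hfC'
        rw [← l3] at e1 e2 e3
        rw [hCstep, l1, l2]
        exact ⟨e1, e2, e3⟩

-- ===== VERDICT =====
theorem rebuild_children_and_depth_spec : Claim_equal_rebuild_children_and_depth := by
  intro children root _
  unfold Spec_rebuild_children_and_depth rebuild_children_and_depth rebuild_children_and_depth_alt
  have hvis : PySem.Set.ofList [root]
      = (((PySem.Dict.empty : PySem.Dict Int Int)).insert root 0).keys := rfl
  obtain ⟨e1, e2, e3⟩ := pv_main children (pvFuel children) (pvFuel children)
    ((PySem.Dict.empty).insert root 0) PySem.Dict.empty [] [root] []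
    (by
      intro u hu
      simp only [List.mem_singleton] at hu
      subst hu
      constructor
      · rw [PySem.Dict.contains_insert]; simp
      · rw [PySem.Dict.getD_insert]; simp)
    rfl
    rfl
    (by simp)
    (by simp)
    (by simp)
    (by rw [pvFuel_eq]; simp)
    (le_refl _)
  rw [hvis]
  dsimp only
  have hne : (pvLoopA children (pvFuel children)
      ((PySem.Dict.empty).insert root 0) PySem.Dict.empty [root]).1.items ≠ [] := by
    intro h
    have hval : (pvLoopA children (pvFuel children)
        ((PySem.Dict.empty).insert root 0) PySem.Dict.empty [root]).1.values = [] := by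
      simp [PySem.Dict.values, h]
    rw [hval] at e3
    simp [PySem.List.max?] at e3
  rw [e1, if_neg hne, e3, e2]
  rfl
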